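-- pv_equiv track=rewrite | github.com/Abrar2652/oist-comparative-genomics | PCS/idea3/distant_pcs_merge_extend.py | concat2
-- ===== SOURCE A (Python) =====
-- def concat2(a,b):
--     la = len(a)
--     lb = len(b)
--     for i in range(lb):
--         j = i
--         k = 0
--         while j < lb and k < la and b[j] == a[k]:
--             j += 1
--             k += 1
--         if j == lb:
--             n = k
--             break
--     else:
--         n = 0
--     return b + a[n:]
-- ===== SOURCE B (Python) =====
-- def concat2(a, b):
--     n = min(len(a), len(b))
--     while n > 0 and not b.endswith(a[:n]):
--         n -= 1
--     return b + a[n:]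
-- ===== Notes on version B (the rewrite author's own statement) =====
-- stated objective: simpler
-- what changed: Replaces the nested for/while character-pointer scan over start positions of b with a single descending loop over overlap lengths testing b.endswith(a[:n]) directly.
import Mathlib
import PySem

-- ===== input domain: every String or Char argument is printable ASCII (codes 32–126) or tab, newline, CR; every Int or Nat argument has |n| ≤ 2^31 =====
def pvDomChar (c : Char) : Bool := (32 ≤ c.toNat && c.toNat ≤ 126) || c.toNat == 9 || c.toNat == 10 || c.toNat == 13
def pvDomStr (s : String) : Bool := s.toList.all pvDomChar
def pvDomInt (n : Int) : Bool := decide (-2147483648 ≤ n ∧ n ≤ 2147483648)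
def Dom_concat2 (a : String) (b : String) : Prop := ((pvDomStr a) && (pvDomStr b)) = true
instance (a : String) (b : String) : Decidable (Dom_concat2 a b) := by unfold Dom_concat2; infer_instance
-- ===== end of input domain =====

-- B replaces A's nested start-position/character-pointer scan by a single descending
-- loop over overlap lengths using b.endswith(a[:n]); same results, plainer code.


-- ===== PORT A =====
-- inner 'while j < lb and k < la and b[j] == a[k]: j += 1; k += 1'
def concat2WhileA (bl al : List Char) (j k : Nat) : Nat × Nat :=
  if h : j < bl.length ∧ k < al.length ∧ bl.getD j default = al.getD k default then
    concat2WhileA bl al (j + 1) (k + 1)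
  else
    (j, k)
termination_by bl.length - j
decreasing_by omega

-- 'for i in range(lb): … if j == lb: n = k; break / else: n = 0'
def concat2ForA (bl al : List Char) (i : Nat) : Nat :=
  if i < bl.length then
    let jk := concat2WhileA bl al i 0
    if jk.1 = bl.length then jk.2 else concat2ForA bl al (i + 1)
  else 0
termination_by bl.length - i
decreasing_by omega

def concat2 (a : String) (b : String) : String :=
  let n := concat2ForA b.toList a.toList 0
  -- 'return b + a[n:]'
  b ++ PySem.Str.slice a (some (n : Int)) none

-- ===== PORT B =====
-- 'while n > 0 and not b.endswith(a[:n]): n -= 1'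
def concat2WhileB (a b : String) (n : Nat) : Nat :=
  if h : 0 < n ∧ ¬ (PySem.Str.endswith b (PySem.Str.slice a none (some (n : Int))) = true) then
    concat2WhileB a b (n - 1)
  else n
termination_by n
decreasing_by omega

def concat2_alt (a : String) (b : String) : String :=
  let n := concat2WhileB a b (min a.length b.length)
  -- 'return b + a[n:]'
  b ++ PySem.Str.slice a (some (n : Int)) none

-- ===== PRECONDITION & SPEC =====
def Spec_concat2 (a : String) (b : String) (out : String) : Prop := out = concat2_alt a b
instance (a : String) (b : String) (out : String) : Decidable (Spec_concat2 a b out) := by unfold Spec_concat2; infer_instance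

-- ===== CLAIM (what is proved, stated in full; the proofs are below) =====
def Claim_equal_concat2 : Prop := ∀ (a : String) (b : String), Dom_concat2 a b → Spec_concat2 a b (concat2 a b)

-- ===== LEMMAS AND PROOFS =====

theorem concat2WhileA_spec (bl al : List Char) (j k : Nat) (hj : j ≤ bl.length) :
    ((concat2WhileA bl al j k).1 = bl.length ↔ bl.drop j <+: al.drop k) ∧
    (bl.drop j <+: al.drop k → (concat2WhileA bl al j k).2 = k + (bl.length - j)) := by
  fun_induction concat2WhileA bl al j k with
  | case1 j k h ih =>
    obtain ⟨hjl, hkl, hc⟩ := h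
    have hd1 : bl.drop j = bl[j] :: bl.drop (j+1) := List.drop_eq_getElem_cons hjl
    have hd2 : al.drop k = al[k] :: al.drop (k+1) := List.drop_eq_getElem_cons hkl
    have hcc : bl[j] = al[k] := by
      rwa [List.getD_eq_getElem _ _ hjl, List.getD_eq_getElem _ _ hkl] at hc
    have ih' := ih (by omega)
    rw [hd1, hd2]
    constructor
    · rw [ih'.1, List.cons_prefix_cons]
      simp [hcc]
    · intro hp
      rw [List.cons_prefix_cons] at hp
      rw [ih'.2 hp.2]
      omega
  | case2 j k h =>
    simp only [not_and] at h
    rcases Nat.lt_or_ge j bl.length with hjl | hjl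
    · have hd1 : bl.drop j = bl[j] :: bl.drop (j+1) := List.drop_eq_getElem_cons hjl
      have hnp : ¬ (bl.drop j <+: al.drop k) := by
        rw [hd1]
        rcases Nat.lt_or_ge k al.length with hkl | hkl
        · have hd2 : al.drop k = al[k] :: al.drop (k+1) := List.drop_eq_getElem_cons hkl
          rw [hd2, List.cons_prefix_cons]
          have := h hjl hkl
          rw [List.getD_eq_getElem _ _ hjl, List.getD_eq_getElem _ _ hkl] at this
          tauto
        · rw [List.drop_eq_nil_of_le hkl]
          intro hp
          exact List.cons_ne_nil _ _ (List.prefix_nil.mp hp)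
      constructor
      · constructor
        · intro he; omega
        · intro hp; exact absurd hp hnp
      · intro hp; exact absurd hp hnp
    · have hje : j = bl.length := by omega
      subst hje
      constructor
      · simp [List.drop_eq_nil_of_le (le_refl bl.length)]
      · intro _; simp

theorem concat2ForA_spec (bl al : List Char) (i : Nat) (hi : i ≤ bl.length) :
    ∃ j, i ≤ j ∧ j ≤ bl.length ∧ bl.drop j <+: al ∧
      concat2ForA bl al i = bl.length - j ∧
      ∀ j', i ≤ j' → j' < j → ¬ (bl.drop j' <+: al) := by
  fun_induction concat2ForA bl al i with
  | case1 i hlt jk hbreak =>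
    have hw := concat2WhileA_spec bl al i 0 (by omega)
    simp only [List.drop_zero] at hw
    have hq : bl.drop i <+: al := hw.1.mp hbreak
    refine ⟨i, le_refl i, by omega, hq, ?_, by omega⟩
    have := hw.2 hq
    simpa using this
  | case2 i hlt jk hbreak ih =>
    obtain ⟨j, hij, hjl, hpre, heq, hmin⟩ := ih (by omega)
    have hw := concat2WhileA_spec bl al i 0 (by omega)
    simp only [List.drop_zero] at hw
    by_cases hq : bl.drop i <+: al
    · exact absurd (hw.1.mpr hq) hbreak
    · refine ⟨j, by omega, hjl, hpre, heq, ?_⟩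
      intro j' h1 h2
      rcases Nat.eq_or_lt_of_le h1 with he | hlt'
      · subst he; exact hq
      · exact hmin j' hlt' h2
  | case3 i hlt =>
    have hie : i = bl.length := by omega
    subst hie
    exact ⟨bl.length, le_refl _, le_refl _, by simp, by omega, by omega⟩

theorem concat2_endswith_take (a b : String) (n : Nat) :
    PySem.Str.endswith b (PySem.Str.slice a none (some (n : Int))) = true ↔
      a.toList.take n <:+ b.toList := by
  rw [show PySem.Str.endswith b (PySem.Str.slice a none (some (n : Int)))
        = PySem.Chars.endswith b.toList (PySem.Str.slice a none (some (n : Int))).toList from by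
      simp]
  rw [PySem.Chars.endswith_iff]
  have : (PySem.Str.slice a none (some (n : Int))).toList = a.toList.take n := by
    simp [PySem.Chars.slice_eq_listSlice, PySem.List.slice_to_natCast]
  rw [this]

theorem concat2WhileB_spec (a b : String) (n : Nat) :
    concat2WhileB a b n ≤ n ∧
    a.toList.take (concat2WhileB a b n) <:+ b.toList ∧
    ∀ m, concat2WhileB a b n < m → m ≤ n → ¬ (a.toList.take m <:+ b.toList) := by
  fun_induction concat2WhileB a b n with
  | case1 n h ih =>
    obtain ⟨hr1, hr2, hr3⟩ := ih
    refine ⟨by omega, hr2, ?_⟩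
    intro m h1 h2
    rcases Nat.lt_or_ge m n with hm | hm
    · exact hr3 m h1 (by omega)
    · have : m = n := by omega
      subst this
      rw [← concat2_endswith_take a b m]
      exact h.2
  | case2 n h =>
    refine ⟨le_refl n, ?_, by omega⟩
    rcases Nat.eq_zero_or_pos n with h0 | hpos
    · subst h0; simp
    · have he : PySem.Str.endswith b (PySem.Str.slice a none (some (n : Int))) = true := by
        by_contra hc
        exact h ⟨hpos, hc⟩
      exact (concat2_endswith_take a b n).mp he

theorem concat2_QtoR (bl al : List Char) (j : Nat)
    (h : bl.drop j <+: al) :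
    al.take (bl.length - j) <:+ bl ∧ bl.length - j ≤ al.length := by
  have hlen : (bl.drop j).length = bl.length - j := by simp
  have heq : bl.drop j = al.take (bl.length - j) := by
    have := List.prefix_iff_eq_take.mp h
    rwa [hlen] at this
  refine ⟨?_, ?_⟩
  · rw [← heq]; exact List.drop_suffix j bl
  · have := h.length_le; omega

theorem concat2_RtoQ (bl al : List Char) (n : Nat)
    (hna : n ≤ al.length) (h : al.take n <:+ bl) :
    bl.drop (bl.length - n) <+: al := by
  have hlen : (al.take n).length = n := by simp [hna]
  have heq : al.take n = bl.drop (bl.length - n) := by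
    have := List.suffix_iff_eq_drop.mp h
    rwa [hlen] at this
  rw [← heq]
  exact List.take_prefix n al

theorem concat2_n_eq (a b : String) :
    concat2ForA b.toList a.toList 0 = concat2WhileB a b (min a.length b.length) := by
  have hla : a.toList.length = a.length := by simp
  have hlb : b.toList.length = b.length := by simp
  obtain ⟨j, _, hjl, hQ, heqA, hminA⟩ := concat2ForA_spec b.toList a.toList 0 (by omega)
  obtain ⟨hr1, hr2, hr3⟩ := concat2WhileB_spec a b (min a.length b.length)
  set r := concat2WhileB a b (min a.length b.length) with hrdef
  rw [heqA]
  obtain ⟨hR, hle⟩ := concat2_QtoR b.toList a.toList j hQ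
  have h1 : b.toList.length - j ≤ r := by
    by_contra hc
    push Not at hc
    exact hr3 _ hc (by omega) hR
  have h2 : r ≤ b.toList.length - j := by
    have hrla : r ≤ a.toList.length := by omega
    have hQ' := concat2_RtoQ b.toList a.toList r hrla hr2
    by_contra hc
    push Not at hc
    have hlt : b.toList.length - r < j := by omega
    exact hminA _ (by omega) hlt hQ'
  omega

-- ===== VERDICT (by name: the statement is the Claim_ definition above) =====
theorem concat2_spec : Claim_equal_concat2 := by
  intro a b _
  unfold Spec_concat2 concat2 concat2_alt
  rw [concat2_n_eq]
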